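-- pv_equiv track=rewrite | github.com/Facofra/numbers-game | game.py | get_Pronico
-- ===== SOURCE A (Python) =====
-- def get_Pronico(k):
--
--     pronico = []
--     for i in range(1,k+1):
--         next = i+1
--         muliplication = i*next
--         if muliplication > k:
--             return pronico
--         pronico.append(i * next)
-- ===== SOURCE B (Python) =====
-- def get_Pronico(k):
--     # Closed form: the largest i with i*(i+1) <= k is (isqrt(4*k+1) - 1) // 2.
--     if k < 2:
--         return []
--     n = 4 * k + 1
--     lo, hi = 1, n  # binary search for isqrt(n): invariant lo*lo <= n < hi*hi
--     while hi - lo > 1: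
--         mid = (lo + hi) // 2
--         if mid * mid <= n:
--             lo = mid
--         else:
--             hi = mid
--     i_max = (lo - 1) // 2
--     return [i * (i + 1) for i in range(1, i_max + 1)]
-- ===== Notes on version B (the rewrite author's own statement) =====
-- stated objective: alternative
-- what changed: Replaces A's test-each-product loop with early return by a closed form: a binary-search integer square root of 4k+1 gives the largest index i_max with i*(i+1) <= k, and the result is a direct map over range(1, i_max+1).
-- outside the precondition, e.g. on get_Pronico(0): A returns None, B returns []; on get_Pronico(-3): A returns None, B returns []
import Mathlib
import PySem

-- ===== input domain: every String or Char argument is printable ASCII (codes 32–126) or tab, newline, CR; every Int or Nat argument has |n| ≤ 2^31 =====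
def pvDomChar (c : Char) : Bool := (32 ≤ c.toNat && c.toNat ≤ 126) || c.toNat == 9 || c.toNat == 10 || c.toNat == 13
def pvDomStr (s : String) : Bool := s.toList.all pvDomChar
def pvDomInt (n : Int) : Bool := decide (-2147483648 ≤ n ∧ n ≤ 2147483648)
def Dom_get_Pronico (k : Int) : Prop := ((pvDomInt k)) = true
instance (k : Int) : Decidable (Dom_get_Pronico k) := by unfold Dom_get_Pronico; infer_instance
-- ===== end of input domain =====

-- B replaces A's test-each-product loop with a closed form: the largest index is
-- computed from a binary-search integer square root, then the list is produced by a map.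

-- ===== PORT A =====
-- A's for-loop with early return; on [] (loop exhausted, only reachable for k < 1,
-- outside Pre_) Python A returns None, the port returns the accumulator.
def goA (k : Int) (acc : List Int) : List Int → List Int
  | [] => acc
  | i :: rest =>
      if i * (i + 1) > k then acc
      else goA k (acc ++ [i * (i + 1)]) rest

def get_Pronico (k : Int) : List Int :=
  goA k [] (PySem.List.pyRange 1 (k + 1) 1)

-- ===== PORT B =====
-- binary search for isqrt n: invariant lo*lo ≤ n < hi*hi
def isqrtGo (n lo hi : Int) : Int :=
  if _h : hi - lo > 1 then
    let mid := PySem.Int.floordiv (lo + hi) 2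
    if mid * mid ≤ n then isqrtGo n mid hi else isqrtGo n lo mid
  else lo
termination_by (hi - lo).toNat
decreasing_by
  all_goals
    rw [PySem.Int.floordiv_eq_ediv_of_pos (by omega : (0:Int) < 2)] at *
    omega

def get_Pronico_alt (k : Int) : List Int :=
  if k < 2 then []
  else
    let n := 4 * k + 1
    let s := isqrtGo n 1 n
    let imax := PySem.Int.floordiv (s - 1) 2
    (PySem.List.pyRange 1 (imax + 1) 1).map (fun i => i * (i + 1))

-- ===== PRECONDITION & SPEC =====
-- Pre_ excludes k < 1, where Python A's loop body never runs and A falls off the end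
-- returning None, which is not a value of the declared list type; B returns [] there.
def Pre_get_Pronico (k : Int) : Prop := 1 ≤ k
instance (k : Int) : Decidable (Pre_get_Pronico k) := by unfold Pre_get_Pronico; infer_instance
def pvWitness_get_Pronico : Int := (30)

def Spec_get_Pronico (k : Int) (out : List Int) : Prop := out = get_Pronico_alt k
instance (k : Int) (out : List Int) : Decidable (Spec_get_Pronico k out) := by unfold Spec_get_Pronico; infer_instance

-- ===== CLAIM (what is proved, stated in full; the proofs are below) =====
def Claim_equal_get_Pronico : Prop := ∀ (k : Int), Dom_get_Pronico k → Pre_get_Pronico k → Spec_get_Pronico k (get_Pronico k)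

-- ===== LEMMAS AND PROOFS =====

theorem isqrtGo_correct (n : Int) : ∀ lo hi : Int, 0 ≤ lo → lo < hi →
    lo * lo ≤ n → n < hi * hi →
    0 ≤ isqrtGo n lo hi ∧ isqrtGo n lo hi * isqrtGo n lo hi ≤ n ∧
      n < (isqrtGo n lo hi + 1) * (isqrtGo n lo hi + 1) := by
  intro lo hi
  induction lo, hi using isqrtGo.induct n with
  | case1 lo hi h mid hm ih =>
    intro hlo hlt hlon hnhi
    rw [isqrtGo, dif_pos h, if_pos hm]
    have hmid : lo ≤ mid ∧ mid ≤ hi := PySem.Int.floordiv_two_mid_bounds (le_of_lt hlt)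
    have hmlt : mid < hi := by
      have := PySem.Int.floordiv_eq_ediv_of_pos (by omega : (0:Int) < 2) (a := lo + hi)
      omega
    exact ih (by omega) hmlt hm hnhi
  | case2 lo hi h mid hm ih =>
    intro hlo hlt hlon hnhi
    rw [isqrtGo, dif_pos h, if_neg hm]
    have hmid : lo ≤ mid ∧ mid ≤ hi := PySem.Int.floordiv_two_mid_bounds (le_of_lt hlt)
    have hmgt : lo < mid := by
      have := PySem.Int.floordiv_eq_ediv_of_pos (by omega : (0:Int) < 2) (a := lo + hi)
      omega
    exact ih hlo hmgt hlon (by omega)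
  | case3 lo hi h =>
    intro hlo hlt hlon hnhi
    rw [isqrtGo, dif_neg h]
    have : hi = lo + 1 := by omega
    exact ⟨hlo, hlon, by rw [this] at hnhi; exact hnhi⟩

-- A's loop over range(a, k+1) with accumulator acc equals acc ++ the pronic map over [a, m+1)
theorem goA_eq (k m : Int) (hk1 : 1 ≤ k) (hm0 : 0 ≤ m) (hmk : m * (m + 1) ≤ k)
    (hk : k < (m + 1) * (m + 2)) :
    ∀ (N : Nat) (a : Int) (acc : List Int), 1 ≤ a → a ≤ m + 1 → (m + 1 - a).toNat = N →
      goA k acc (PySem.List.pyRange a (k + 1) 1) =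
        acc ++ (PySem.List.pyRange a (m + 1) 1).map (fun i => i * (i + 1)) := by
  have hmltk : m < k := by nlinarith [mul_self_nonneg m]
  intro N
  induction N with
  | zero =>
    intro a acc ha1 ham hN
    have ha : a = m + 1 := by omega
    subst ha
    rw [PySem.List.pyRange_one_cons (by omega), goA,
        if_pos (by nlinarith), PySem.List.pyRange_one_eq_nil (by omega)]
    simp
  | succ N ih =>
    intro a acc ha1 ham hN
    have ham' : a ≤ m := by omega
    have hprod : a * (a + 1) ≤ k := by nlinarith
    rw [PySem.List.pyRange_one_cons (by omega : a < k + 1), goA, if_neg (by omega),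
        ih (a + 1) _ (by omega) (by omega) (by omega),
        PySem.List.pyRange_one_cons (by omega : a < m + 1)]
    simp

theorem get_Pronico_eq_alt (k : Int) (hk : 1 ≤ k) : get_Pronico k = get_Pronico_alt k := by
  rcases lt_or_ge k 2 with h2 | h2
  · have : k = 1 := by omega
    subst this
    decide
  · have hn : (1:Int) < 4 * k + 1 := by omega
    have hsq := isqrtGo_correct (4 * k + 1) 1 (4 * k + 1) (by omega) hn (by omega)
      (by nlinarith)
    set s := isqrtGo (4 * k + 1) 1 (4 * k + 1) with hs
    obtain ⟨hs0, hsle, hslt⟩ := hsq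
    have hs1 : 1 ≤ s := by nlinarith
    set m := PySem.Int.floordiv (s - 1) 2 with hmdef
    have hmb : m * 2 ≤ s - 1 ∧ s - 1 < (m + 1) * 2 := by
      have := (PySem.Int.floordiv_eq_iff_of_pos (a := s - 1) (b := 2) (q := m)
        (by omega)).mp hmdef.symm
      exact this
    have hm0 : 0 ≤ m := by omega
    have hmk : m * (m + 1) ≤ k := by nlinarith
    have hkm : k < (m + 1) * (m + 2) := by nlinarith
    unfold get_Pronico get_Pronico_alt
    rw [if_neg (by omega)]
    simp only
    rw [← hs, ← hmdef]
    exact goA_eq k m (by omega) hm0 hmk hkm (m + 1 - 1).toNat 1 [] (by omega) (by omega) rfl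

-- ===== VERDICT (by name: the statement is the Claim_ definition above) =====
theorem get_Pronico_spec : Claim_equal_get_Pronico := by
  intro k _ hk
  exact get_Pronico_eq_alt k hk
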